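-- pv_equiv track=rewrite | github.com/Ace1928/eidosian_forge | projects/src/self_exploration/auditor.py | identify_improvements
-- ===== SOURCE A (Python) =====
-- from typing import Any, Dict, List, Optional
--
-- def identify_improvements(provenance: List[Dict], introspections: List[Dict]) -> List[str]:
--     """Identify improvement opportunities."""
--     improvements = []
--
--     # Check for underutilized features
--     if len(provenance) < len(introspections):
--         improvements.append("Some introspections may lack provenance records - ensure full traceability")
--
--     # Check for stale areas
--     if introspections:
--         tag_last_seen = {}
--         for i, intro in enumerate(introspections):
--             for tag in intro.get("tags", []):
--                 tag_last_seen[tag] = i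
--
--         stale_tags = [t for t, idx in tag_last_seen.items() if idx < len(introspections) - 3]
--         if stale_tags:
--             improvements.append(f"Consider revisiting stale topics: {', '.join(stale_tags[:3])}")
--
--     # Suggest based on uncertainty count
--     total_uncertainties = sum(len(i.get("uncertainties", [])) for i in introspections)
--     if total_uncertainties > 20:
--         improvements.append(f"High uncertainty count ({total_uncertainties}) - consider focused exploration")
--
--     # Suggest meta-improvements
--     improvements.append("Consider: How often should audits run? (meta-improvement)")
--     improvements.append("Consider: Are the right questions being asked? (meta-improvement)")
--
--     return improvements
-- ===== SOURCE B (Python) =====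
-- from typing import Any, Dict, List, Optional
--
-- def _traceability_note(provenance, introspections):
--     if len(provenance) < len(introspections):
--         return "Some introspections may lack provenance records - ensure full traceability"
--     return None
--
-- def _stale_note(introspections):
--     # Stale = appears somewhere, but not in any of the last three introspections.
--     if not introspections:
--         return None
--     recent = set()
--     for intro in introspections[-3:]:
--         recent.update(intro.get("tags", []))
--     seen = set()
--     stale_tags = []
--     for intro in introspections:
--         for tag in intro.get("tags", []):
--             if tag not in seen:
--                 seen.add(tag)
--                 if tag not in recent:
--                     stale_tags.append(tag)
--     if stale_tags:
--         return f"Consider revisiting stale topics: {', '.join(stale_tags[:3])}"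
--     return None
--
-- def _uncertainty_note(introspections):
--     total = 0
--     for i in introspections:
--         total += len(i.get("uncertainties", []))
--     if total > 20:
--         return f"High uncertainty count ({total}) - consider focused exploration"
--     return None
--
-- def identify_improvements(provenance: List[Dict], introspections: List[Dict]) -> List[str]:
--     """Identify improvement opportunities."""
--     candidates = [
--         _traceability_note(provenance, introspections),
--         _stale_note(introspections),
--         _uncertainty_note(introspections),
--     ]
--     return [c for c in candidates if c is not None] + [
--         "Consider: How often should audits run? (meta-improvement)",
--         "Consider: Are the right questions being asked? (meta-improvement)",
--     ]
-- ===== Notes on version B (the rewrite author's own statement) =====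
-- stated objective: alternative
-- what changed: B decomposes the function into three helpers that each return an optional note assembled by a None-filter, replaces A's tag->last-index dict plus the 'idx < n-3' items filter with a recent-window membership set built from introspections[-3:] and a single filtered first-occurrence scan with a seen-set, and folds the uncertainty total with a plain accumulator loop instead of a generator sum.
import Mathlib
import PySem

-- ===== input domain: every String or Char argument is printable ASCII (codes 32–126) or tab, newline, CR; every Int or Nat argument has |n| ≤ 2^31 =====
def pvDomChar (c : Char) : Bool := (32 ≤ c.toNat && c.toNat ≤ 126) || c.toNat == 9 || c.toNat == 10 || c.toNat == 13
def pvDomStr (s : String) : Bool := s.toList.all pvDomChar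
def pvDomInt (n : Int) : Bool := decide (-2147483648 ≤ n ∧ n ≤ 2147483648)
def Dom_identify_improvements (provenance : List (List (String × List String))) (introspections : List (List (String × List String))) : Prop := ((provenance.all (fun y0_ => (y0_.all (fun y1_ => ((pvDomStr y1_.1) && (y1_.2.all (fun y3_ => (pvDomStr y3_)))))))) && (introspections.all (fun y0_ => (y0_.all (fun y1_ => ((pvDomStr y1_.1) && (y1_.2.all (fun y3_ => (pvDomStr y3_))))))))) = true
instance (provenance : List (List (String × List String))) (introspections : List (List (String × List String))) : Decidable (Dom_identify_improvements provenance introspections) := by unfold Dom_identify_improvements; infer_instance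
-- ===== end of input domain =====

-- B is a different decomposition: three helpers each produce an optional note (traceability /
-- stale-topics / uncertainty) assembled by a None-filter, and the stale scan uses a recent-window
-- set plus a first-occurrence filtered scan instead of A's tag→last-index dict (objective: alternative).

-- shared accessor: the Python expression `intro.get("tags", [])` (resp. "uncertainties"),
-- where each record is the association list of a Python dict
def pvGetTags (d : List (String × List String)) : List String :=
  (PySem.Dict.ofList d).getD "tags" []
def pvGetUnc (d : List (String × List String)) : List String :=
  (PySem.Dict.ofList d).getD "uncertainties" []

-- ===== PORT A =====
-- tag_last_seen = {}; for i, intro in enumerate(introspections): for tag in intro.get("tags", []): tag_last_seen[tag] = i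
def pvTagLastSeen (introspections : List (List (String × List String))) : PySem.Dict String Int :=
  (PySem.List.enumerate introspections 0).foldl
    (fun d p => (pvGetTags p.2).foldl (fun d t => d.insert t p.1) d)
    PySem.Dict.empty

-- stale_tags = [t for t, idx in tag_last_seen.items() if idx < len(introspections) - 3]
def pvStaleA (introspections : List (List (String × List String))) : List String :=
  ((pvTagLastSeen introspections).items.filter
      (fun q => q.2 < (introspections.length : Int) - 3)).map (·.1)

-- total_uncertainties = sum(len(i.get("uncertainties", [])) for i in introspections)
def pvTotalA (introspections : List (List (String × List String))) : Int :=
  (introspections.map (fun i => ((pvGetUnc i).length : Int))).sum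

def identify_improvements (provenance : List (List (String × List String))) (introspections : List (List (String × List String))) : List String :=
  let improvements : List String :=
    if provenance.length < introspections.length then
      ["Some introspections may lack provenance records - ensure full traceability"]
    else []
  let improvements :=
    if introspections ≠ [] then
      let stale_tags := pvStaleA introspections
      if stale_tags ≠ [] then
        improvements ++ ["Consider revisiting stale topics: " ++ PySem.Str.join ", " (stale_tags.take 3)]
      else improvements
    else improvements
  let total_uncertainties := pvTotalA introspections
  let improvements :=
    if 20 < total_uncertainties then
      improvements ++ ["High uncertainty count (" ++ PySem.Int.toStr total_uncertainties ++ ") - consider focused exploration"]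
    else improvements
  improvements ++ ["Consider: How often should audits run? (meta-improvement)",
                   "Consider: Are the right questions being asked? (meta-improvement)"]

-- ===== PORT B =====
-- def _traceability_note(provenance, introspections): …
def pvTraceNote (provenance : List (List (String × List String))) (introspections : List (List (String × List String))) : Option String :=
  if provenance.length < introspections.length then
    some "Some introspections may lack provenance records - ensure full traceability"
  else none

-- recent = set(); for intro in introspections[-3:]: recent.update(intro.get("tags", []))
def pvRecent (introspections : List (List (String × List String))) : PySem.Set String :=
  (PySem.List.slice introspections (some (-3)) none).foldl
    (fun s intro => PySem.Set.update s (pvGetTags intro)) PySem.Set.empty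

-- seen = set(); stale_tags = []; for intro in introspections: for tag in intro.get("tags", []):
--   if tag not in seen: seen.add(tag); if tag not in recent: stale_tags.append(tag)
def pvStaleB (introspections : List (List (String × List String))) : List String :=
  (introspections.foldl
    (fun (acc : PySem.Set String × List String) intro =>
      (pvGetTags intro).foldl
        (fun acc t =>
          if PySem.Set.contains acc.1 t then acc
          else (PySem.Set.add acc.1 t,
                if PySem.Set.contains (pvRecent introspections) t then acc.2 else acc.2 ++ [t]))
        acc)
    (PySem.Set.empty, [])).2

-- def _stale_note(introspections): …
def pvStaleNote (introspections : List (List (String × List String))) : Option String :=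
  if introspections = [] then none
  else
    let stale_tags := pvStaleB introspections
    if stale_tags ≠ [] then
      some ("Consider revisiting stale topics: " ++ PySem.Str.join ", " (stale_tags.take 3))
    else none

-- def _uncertainty_note(introspections): total = 0; for i in …: total += len(…); …
def pvUncNote (introspections : List (List (String × List String))) : Option String :=
  let total := introspections.foldl (fun acc i => acc + ((pvGetUnc i).length : Int)) 0
  if 20 < total then
    some ("High uncertainty count (" ++ PySem.Int.toStr total ++ ") - consider focused exploration")
  else none

-- candidates = [...]; return [c for c in candidates if c is not None] + the two meta lines
def identify_improvements_alt (provenance : List (List (String × List String))) (introspections : List (List (String × List String))) : List String :=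
  ([pvTraceNote provenance introspections,
    pvStaleNote introspections,
    pvUncNote introspections].filterMap id)
  ++ ["Consider: How often should audits run? (meta-improvement)",
      "Consider: Are the right questions being asked? (meta-improvement)"]

-- ===== PRECONDITION & SPEC =====
def Spec_identify_improvements (provenance : List (List (String × List String))) (introspections : List (List (String × List String))) (out : List String) : Prop := out = identify_improvements_alt provenance introspections
instance (provenance : List (List (String × List String))) (introspections : List (List (String × List String))) (out : List String) : Decidable (Spec_identify_improvements provenance introspections out) := by unfold Spec_identify_improvements; infer_instance

-- ===== CLAIM (what is proved, stated in full; the proofs are below) =====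
def Claim_equal_identify_improvements : Prop := ∀ (provenance : List (List (String × List String))) (introspections : List (List (String × List String))), Dom_identify_improvements provenance introspections → Spec_identify_improvements provenance introspections (identify_improvements provenance introspections)

-- ===== LEMMAS AND PROOFS =====

-- tags of the records outside / inside the three-record recent window
def pvFrontTags (introspections : List (List (String × List String))) : List String :=
  ((introspections.take (introspections.length - 3)).map pvGetTags).flatten
def pvBackTags (introspections : List (List (String × List String))) : List String :=
  ((introspections.drop (introspections.length - 3)).map pvGetTags).flatten

theorem pv_foldUpdate (ls : List (List String)) (s : PySem.Set String) :
    ls.foldl PySem.Set.update s = PySem.Set.update s ls.flatten := by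
  induction ls generalizing s with
  | nil => simp [PySem.Set.update]
  | cons l rest ih => simp [List.foldl_cons, ih, PySem.Set.update_append]

theorem pv_filter_ofList_append (xs ys : List String) :
    (PySem.Set.ofList (xs ++ ys)).filter (fun t => !(ys.contains t))
      = (PySem.Set.ofList xs).filter (fun t => !(ys.contains t)) := by
  rw [PySem.Set.ofList_append, PySem.Set.update_eq_append_filter, List.filter_append]
  have h : List.filter (fun t => !(ys.contains t))
      (List.filter (fun y => !(PySem.Set.ofList xs).contains y) (PySem.Set.ofList ys)) = [] := by
    rw [List.filter_eq_nil_iff]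
    intro t ht
    have : t ∈ PySem.Set.ofList ys := List.mem_of_mem_filter ht
    have : t ∈ ys := (PySem.Set.mem_ofList ys t).1 this
    simp [this]
  rw [h, List.append_nil]

theorem pv_Bloop (r : PySem.Set String) (ts : List String) :
    ts.foldl
      (fun (acc : PySem.Set String × List String) t =>
        if PySem.Set.contains acc.1 t then acc
        else (PySem.Set.add acc.1 t,
              if PySem.Set.contains r t then acc.2 else acc.2 ++ [t]))
      (PySem.Set.empty, ([] : List String))
    = (PySem.Set.ofList ts, (PySem.Set.ofList ts).filter (fun t => !(PySem.Set.contains r t))) := by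
  induction ts using List.reverseRecOn with
  | nil => rfl
  | append_singleton ts t ih =>
    rw [List.foldl_append, ih, List.foldl_cons, List.foldl_nil]
    by_cases hmem : t ∈ PySem.Set.ofList ts
    · have hc : (PySem.Set.ofList ts).contains t = true := (PySem.Set.contains_iff _ _).2 hmem
      rw [PySem.Set.ofList_append_singleton, PySem.Set.add_of_mem hmem, if_pos hc]
    · have hc : (PySem.Set.ofList ts).contains t = false := by
        rcases h : (PySem.Set.ofList ts).contains t
        · rfl
        · exact absurd ((PySem.Set.contains_iff _ _).1 h) hmem
      rw [PySem.Set.ofList_append_singleton]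
      rw [PySem.Set.add_of_not_mem hmem, List.filter_append,
          if_neg (by rw [hc]; exact Bool.false_ne_true)]
      rcases hr : PySem.Set.contains r t
      · have hr' : t ∉ r := fun hm => by
          rw [(PySem.Set.contains_iff r t).2 hm] at hr
          exact absurd hr (by simp)
        simp [hr']
      · have hr' : t ∈ r := (PySem.Set.contains_iff r t).1 hr
        simp [hr']

theorem pv_recent_eq (introspections : List (List (String × List String))) :
    pvRecent introspections = PySem.Set.ofList (pvBackTags introspections) := by
  unfold pvRecent pvBackTags
  rw [PySem.List.slice_from_neg_ofNat introspections 3 (by omega), ← List.foldl_map,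
      pv_foldUpdate, PySem.Set.update_empty]

theorem pv_flat_split (introspections : List (List (String × List String))) :
    introspections.flatMap pvGetTags = pvFrontTags introspections ++ pvBackTags introspections := by
  unfold pvFrontTags pvBackTags
  rw [← List.flatten_append, ← List.map_append, List.take_append_drop, List.flatMap_def]

theorem pv_staleB_char (introspections : List (List (String × List String))) :
    pvStaleB introspections
      = (PySem.Set.ofList (pvFrontTags introspections ++ pvBackTags introspections)).filter
          (fun t => !((pvBackTags introspections).contains t)) := by
  unfold pvStaleB
  rw [← List.foldl_flatMap, pv_Bloop (pvRecent introspections) (introspections.flatMap pvGetTags)]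
  rw [pv_flat_split]
  refine List.filter_congr ?_
  intro t _
  rw [pv_recent_eq]
  congr 1
  rcases h : (pvBackTags introspections).contains t
  · have : t ∉ pvBackTags introspections := by simpa using h
    have : t ∉ PySem.Set.ofList (pvBackTags introspections) := by
      simpa [PySem.Set.mem_ofList] using this
    simpa [PySem.Set.contains_eq_listContains] using this
  · have : t ∈ pvBackTags introspections := by simpa using h
    have h2 : t ∈ PySem.Set.ofList (pvBackTags introspections) := by
      simpa [PySem.Set.mem_ofList] using this
    simpa [PySem.Set.contains_eq_listContains] using h2

theorem pv_valsBound_inner (c i : Int) (hi : i < c) (ts : List String) (d : PySem.Dict String Int)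
    (hd : ∀ q ∈ d.items, q.2 < c) :
    ∀ q ∈ (ts.foldl (fun d t => d.insert t i) d).items, q.2 < c := by
  induction ts generalizing d with
  | nil => exact hd
  | cons t rest ih =>
    refine ih (d.insert t i) ?_
    intro q hq
    rcases (PySem.Dict.mem_items_insert d t i q).1 hq with h | h
    · subst h; exact hi
    · exact hd q h.1

theorem pv_insertFilter (t : String) (i : Int) (g : String × Int → Bool) (hg : g (t, i) = false)
    (d : PySem.Dict String Int) :
    (d.insert t i).items.filter g = d.items.filter (fun q => g q && !(q.1 == t)) := by
  by_cases h : d.contains t = true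
  · rw [PySem.Dict.items_insert_of_contains d i h, List.filter_map]
    have hfun : (g ∘ fun p => if (p.1 == t) = true then (t, i) else p)
        = (fun q => g q && !(q.1 == t)) := by
      funext q
      by_cases hq : (q.1 == t) = true <;> simp [Function.comp, hq, hg]
    rw [hfun]
    refine (List.map_congr_left ?_).trans (List.map_id _)
    intro q hq
    have := List.of_mem_filter hq
    by_cases hq1 : (q.1 == t) = true
    · simp [hq1] at this
    · simp [hq1]
  · rw [PySem.Dict.items_insert_of_not_contains d i (by simpa using h), List.filter_append]
    simp only [List.filter_cons, hg, Bool.false_eq_true, if_false, List.filter_nil, List.append_nil]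
    refine List.filter_congr ?_
    intro q hq
    have hk : q.1 ∈ d.keys := PySem.Dict.mem_keys_of_mem_items d hq
    have ht : t ∉ d.keys := by
      intro hmem
      exact h ((PySem.Dict.contains_iff_mem_keys d t).2 hmem)
    have : q.1 ≠ t := fun he => ht (he ▸ hk)
    simp [this]

theorem pv_innerFilter (i : Int) (ts : List String) (g : String × Int → Bool)
    (hg : ∀ t', g (t', i) = false) (d : PySem.Dict String Int) :
    ((ts.foldl (fun d t => d.insert t i) d).items.filter g)
      = d.items.filter (fun q => g q && !(ts.contains q.1)) := by
  induction ts generalizing d with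
  | nil => simp
  | cons t rest ih =>
    rw [List.foldl_cons, ih (d.insert t i),
        pv_insertFilter t i (fun q => g q && !(rest.contains q.1)) (by simp [hg]) d]
    refine List.filter_congr ?_
    intro q _
    by_cases h1 : q.1 = t <;> simp [h1, List.contains_cons, Bool.and_assoc, Bool.and_comm]

theorem pv_outerFilter (c : Int) (ps : List (Int × List (String × List String)))
    (d : PySem.Dict String Int) (g : String × Int → Bool)
    (hps : ∀ p ∈ ps, c ≤ p.1) (hg : ∀ t' i', c ≤ i' → g (t', i') = false) :
    ((ps.foldl (fun d p => (pvGetTags p.2).foldl (fun d t => d.insert t p.1) d) d).items.filter g)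
      = d.items.filter (fun q => g q && !(((ps.map (fun p => pvGetTags p.2)).flatten).contains q.1)) := by
  induction ps generalizing d g with
  | nil => simp
  | cons p rest ih =>
    rw [List.foldl_cons,
        ih ((pvGetTags p.2).foldl (fun d t => d.insert t p.1) d) g (fun q hq => hps q (List.mem_cons_of_mem _ hq)) hg,
        pv_innerFilter p.1 (pvGetTags p.2)
          (fun q => g q && !(((rest.map (fun p => pvGetTags p.2)).flatten).contains q.1))
          (fun t' => by simp [hg t' p.1 (hps p List.mem_cons_self)]) d]
    refine List.filter_congr ?_
    intro q _
    by_cases h1 : q.1 ∈ pvGetTags p.2 <;>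
      by_cases h2 : q.1 ∈ (rest.map (fun p => pvGetTags p.2)).flatten <;>
      simp [h1, h2, Bool.and_assoc, Bool.and_comm]

theorem pv_valsBound (c : Int) (ps : List (Int × List (String × List String))) (d : PySem.Dict String Int)
    (hps : ∀ p ∈ ps, p.1 < c) (hd : ∀ q ∈ d.items, q.2 < c) :
    ∀ q ∈ (ps.foldl (fun d p => (pvGetTags p.2).foldl (fun d t => d.insert t p.1) d) d).items, q.2 < c := by
  induction ps generalizing d with
  | nil => exact hd
  | cons p rest ih =>
    rw [List.foldl_cons]
    exact ih _ (fun q hq => hps q (List.mem_cons_of_mem _ hq))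
      (pv_valsBound_inner c p.1 (hps p List.mem_cons_self) (pvGetTags p.2) d hd)

theorem pv_keysFold (ps : List (Int × List (String × List String))) (d : PySem.Dict String Int) :
    (ps.foldl (fun d p => (pvGetTags p.2).foldl (fun d t => d.insert t p.1) d) d).keys
      = PySem.Set.update d.keys ((ps.map (fun p => pvGetTags p.2)).flatten) := by
  induction ps generalizing d with
  | nil => simp [PySem.Set.update]
  | cons p rest ih =>
    simp only [List.foldl_cons, ih, List.map_cons, List.flatten_cons, PySem.Set.update_append]
    congr 1
    exact PySem.Dict.keys_foldl_insert (pvGetTags p.2) (fun _ _ => p.1) d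

theorem pv_enumMap (xs : List (List (String × List String))) (s : Int) :
    ((PySem.List.enumerate xs s).map (fun p => pvGetTags p.2)).flatten
      = (xs.map pvGetTags).flatten := by
  have : (PySem.List.enumerate xs s).map (fun p => pvGetTags p.2)
      = ((PySem.List.enumerate xs s).map (·.2)).map pvGetTags := by
    rw [List.map_map]
    simp [Function.comp]
  rw [this, PySem.List.map_snd_enumerate]

theorem pv_staleA_split (front back : List (List (String × List String))) (c : Int)
    (hfront : ∀ j : Nat, j < front.length → (j : Int) < c)
    (hback : c ≤ (front.length : Int)) :
    ((((PySem.List.enumerate (front ++ back) 0).foldl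
        (fun d p => (pvGetTags p.2).foldl (fun d t => d.insert t p.1) d)
        PySem.Dict.empty).items.filter (fun q => q.2 < c)).map (·.1))
      = (PySem.Set.ofList ((front.map pvGetTags).flatten)).filter
          (fun t => !(((back.map pvGetTags).flatten).contains t)) := by
  rw [PySem.List.enumerate_append, List.foldl_append]
  set d1 := (PySem.List.enumerate front 0).foldl
    (fun d p => (pvGetTags p.2).foldl (fun d t => d.insert t p.1) d) PySem.Dict.empty with hd1
  have hvals : ∀ q ∈ d1.items, q.2 < c := by
    refine pv_valsBound c _ _ ?_ (by simp [PySem.Dict.empty])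
    intro p hp
    rcases (PySem.List.mem_enumerate_iff front 0 p).1 hp with ⟨j, hj, rfl⟩
    simpa using hfront j hj
  rw [pv_outerFilter c _ d1 _ ?_ ?_]
  · rw [pv_enumMap back (0 + (front.length : Int))]
    have hfc : d1.items.filter
          (fun q => decide (q.2 < c) && !(((back.map pvGetTags).flatten).contains q.1))
        = d1.items.filter (fun q => !(((back.map pvGetTags).flatten).contains q.1)) := by
      refine List.filter_congr ?_
      intro q hq
      simp [hvals q hq]
    rw [hfc]
    have hkeys : d1.keys = PySem.Set.ofList ((front.map pvGetTags).flatten) := by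
      rw [hd1, pv_keysFold, pv_enumMap front 0]
      rw [show (PySem.Dict.empty : PySem.Dict String Int).keys = [] from rfl,
          PySem.Set.update_nil_left]
    rw [← hkeys]
    rw [show d1.keys = d1.items.map (·.1) from rfl, List.filter_map]
    rfl
  · intro p hp
    rcases (PySem.List.mem_enumerate_iff back (0 + (front.length : Int)) p).1 hp with ⟨j, hj, rfl⟩
    simp only []
    omega
  · intro t' i' hi'
    simp only [decide_eq_false_iff_not, not_lt]
    exact hi'

theorem pv_staleA_char (introspections : List (List (String × List String))) :
    pvStaleA introspections
      = (PySem.Set.ofList (pvFrontTags introspections)).filter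
          (fun t => !((pvBackTags introspections).contains t)) := by
  unfold pvStaleA pvTagLastSeen pvFrontTags pvBackTags
  conv_lhs =>
    rw [show PySem.List.enumerate introspections 0
          = PySem.List.enumerate
              (introspections.take (introspections.length - 3)
                ++ introspections.drop (introspections.length - 3)) 0 from by
        rw [List.take_append_drop]]
  rw [pv_staleA_split]
  · intro j hj
    rw [List.length_take] at hj
    omega
  · rw [List.length_take]
    omega

theorem pv_staleAB (introspections : List (List (String × List String))) :
    pvStaleA introspections = pvStaleB introspections := by
  rw [pv_staleA_char, pv_staleB_char, pv_filter_ofList_append]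

theorem pv_totalAB (introspections : List (List (String × List String))) :
    pvTotalA introspections
      = introspections.foldl (fun acc i => acc + ((pvGetUnc i).length : Int)) 0 := by
  unfold pvTotalA
  rw [PySem.List.foldl_add introspections (fun i => ((pvGetUnc i).length : Int)) 0, zero_add]

-- ===== VERDICT (by name: the statement is the Claim_ definition above) =====
theorem identify_improvements_spec : Claim_equal_identify_improvements := by
  intro provenance introspections _
  unfold Spec_identify_improvements identify_improvements identify_improvements_alt
  unfold pvTraceNote pvStaleNote pvUncNote
  rw [pv_staleAB, pv_totalAB]
  by_cases h1 : provenance.length < introspections.length <;>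
    by_cases h2 : introspections = [] <;>
      by_cases h3 : pvStaleB introspections ≠ [] <;>
        by_cases h4 : 20 < introspections.foldl (fun acc i => acc + ((pvGetUnc i).length : Int)) 0 <;>
          simp [h1, h2, h3, h4, List.filterMap]
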